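-- pv_equiv track=rewrite | github.com/logos914/INTRO-PROGRA-Resueltos | parcial-2/2022-ej1a.py | tieneMasDeUnRepetido
-- ===== SOURCE A (Python) =====
-- def tieneMasDeUnRepetido(cadena):
--
--     queNumerosAparecen = []
--     cuantasVecesAparece = []
--
--     for i in cadena:
--         if aparece(i,queNumerosAparecen):
--             pos = EnQuePosicionEsta(i,queNumerosAparecen)
--             cuantasVecesAparece[pos] += 1
--         else:
--             queNumerosAparecen.append(i)
--             cuantasVecesAparece.append(1)
--
--
--     hayUnNumeroRepetido = False
--
--
--     for cant in cuantasVecesAparece: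
--
--         if cant > 2:
--             return True
--
--         if cant == 2 and hayUnNumeroRepetido:
--             return True
--
--         if cant == 2 and (not hayUnNumeroRepetido):
--             hayUnNumeroRepetido = True
--
--
--
--     return False
--
-- def aparece(elemento, lista):
--     for i in lista:
--         if elemento == i:
--             return True
--     return False
--
-- def EnQuePosicionEsta(elemento, lista):
--     for i in range(0,len(lista)):
--         if lista[i] == elemento:
--             return i
-- ===== SOURCE B (Python) =====
-- def tieneMasDeUnRepetido(cadena):
--     return len(cadena) - len(set(cadena)) > 1
-- ===== Notes on version B (the rewrite author's own statement) =====
-- stated objective: faster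
-- what changed: Replaced A's two passes (parallel element/count lists maintained with linear membership and position scans, then a count-scan with a repeat flag) by the closed form len(cadena) - len(set(cadena)) > 1: there is more than one surplus character iff length minus distinct count exceeds 1.
import Mathlib
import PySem

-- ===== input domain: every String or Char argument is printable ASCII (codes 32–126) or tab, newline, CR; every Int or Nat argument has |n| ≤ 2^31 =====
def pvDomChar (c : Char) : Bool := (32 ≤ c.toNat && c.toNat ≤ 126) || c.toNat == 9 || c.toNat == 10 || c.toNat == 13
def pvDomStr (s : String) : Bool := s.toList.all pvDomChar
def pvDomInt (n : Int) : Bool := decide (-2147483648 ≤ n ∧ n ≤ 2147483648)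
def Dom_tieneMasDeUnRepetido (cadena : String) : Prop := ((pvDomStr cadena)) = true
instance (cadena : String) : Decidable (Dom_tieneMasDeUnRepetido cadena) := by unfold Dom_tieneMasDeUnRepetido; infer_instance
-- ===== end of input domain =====

-- B replaces A's two explicit scans by the closed form len(cadena) - len(set(cadena)) > 1 (asymptotically faster).

-- ===== PORT A =====
def aparece (elemento : Char) (lista : List Char) : Bool :=
  match lista with
  | [] => false
  | i :: rest => if elemento == i then true else aparece elemento rest

-- loop 'for i in range(0, len(lista)): if lista[i] == elemento: return i'; indices come from
-- range(0, len(lista)) so lista[i] is always in range and the pyGetD default is never used.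
def enQueGo (elemento : Char) (lista : List Char) (idxs : List Int) : Option Int :=
  match idxs with
  | [] => none
  | i :: rest =>
    if PySem.List.pyGetD lista i elemento == elemento then some i
    else enQueGo elemento lista rest

def EnQuePosicionEsta (elemento : Char) (lista : List Char) : Option Int :=
  enQueGo elemento lista (PySem.List.pyRange 0 lista.length 1)

def tmLoop1 : List Char → List Char × List Int → List Char × List Int
  | [], st => st
  | i :: rest, (q, c) =>
    if aparece i q then
      match EnQuePosicionEsta i q with
      | some pos =>
          tmLoop1 rest (q, PySem.List.pySetD c pos (PySem.List.pyGetD c pos 0 + 1))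
      | none => tmLoop1 rest (q, c)  -- unreachable: aparece i q = true guarantees a position
    else tmLoop1 rest (q ++ [i], c ++ [1])

def tmLoop2 : List Int → Bool → Bool
  | [], _ => false
  | cant :: rest, flag =>
    if cant > 2 then true
    else if cant == 2 && flag then true
    else if cant == 2 && !flag then tmLoop2 rest true
    else tmLoop2 rest flag

def tieneMasDeUnRepetido (cadena : String) : Bool :=
  let st := tmLoop1 cadena.toList ([], [])
  tmLoop2 st.2 false

-- ===== PORT B =====
def tieneMasDeUnRepetido_alt (cadena : String) : Bool :=
  decide ((cadena.toList.length : Int) - ((PySem.Set.ofList cadena.toList).length : Int) > 1)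

-- ===== PRECONDITION & SPEC =====
def Spec_tieneMasDeUnRepetido (cadena : String) (out : Bool) : Prop := out = tieneMasDeUnRepetido_alt cadena
instance (cadena : String) (out : Bool) : Decidable (Spec_tieneMasDeUnRepetido cadena out) := by unfold Spec_tieneMasDeUnRepetido; infer_instance

-- ===== CLAIM (what is proved, stated in full; the proofs are below) =====
def Claim_equal_tieneMasDeUnRepetido : Prop := ∀ (cadena : String), Dom_tieneMasDeUnRepetido cadena → Spec_tieneMasDeUnRepetido cadena (tieneMasDeUnRepetido cadena)

-- ===== LEMMAS AND PROOFS =====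

theorem aparece_eq_contains (e : Char) (l : List Char) : aparece e l = l.contains e := by
  induction l with
  | nil => rfl
  | cons x xs ih =>
    simp only [aparece, List.contains_cons, ih]
    by_cases h : e == x <;> simp [h]

theorem enQueGo_mem (e : Char) (l : List Char) (idxs : List Int) (i : Int)
    (h : enQueGo e l idxs = some i) : i ∈ idxs := by
  induction idxs with
  | nil => simp [enQueGo] at h
  | cons j rest ih =>
    simp only [enQueGo] at h
    split at h
    · simp_all
    · exact List.mem_cons_of_mem _ (ih h)

theorem enQueGo_none (e : Char) (l : List Char) (idxs : List Int)
    (h : enQueGo e l idxs = none) :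
    ∀ i ∈ idxs, ¬ (PySem.List.pyGetD l i e == e) = true := by
  induction idxs with
  | nil => simp
  | cons j rest ih =>
    simp only [enQueGo] at h
    split at h
    next => exact absurd h (by simp)
    next hne =>
      intro i hi
      rcases List.mem_cons.mp hi with rfl | hi
      · exact hne
      · exact ih h i hi

-- if e ∈ l, the position scan finds an in-range index
theorem EnQue_of_mem (e : Char) (l : List Char) (he : e ∈ l) :
    ∃ pos : Int, EnQuePosicionEsta e l = some pos ∧ 0 ≤ pos ∧ pos < (l.length : Int) := by
  unfold EnQuePosicionEsta
  cases h : enQueGo e l (PySem.List.pyRange 0 l.length 1) with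
  | none =>
    exfalso
    obtain ⟨k, hk, hke⟩ := List.getElem_of_mem he
    have hmem : (k : Int) ∈ PySem.List.pyRange 0 (l.length : Int) 1 := by
      rw [PySem.List.mem_pyRange_one]; omega
    have := enQueGo_none e l _ h (k : Int) (by exact_mod_cast hmem)
    rw [PySem.List.pyGetD_natCast] at this
    simp [List.getD, hk, hke] at this
  | some pos =>
    refine ⟨pos, rfl, ?_⟩
    have := enQueGo_mem e l _ pos h
    rw [PySem.List.mem_pyRange_one] at this
    omega

theorem sum_set_int (c : List Int) (n : Nat) (v : Int) (hn : n < c.length) :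
    (c.set n v).sum = c.sum - c.getD n 0 + v := by
  induction c generalizing n with
  | nil => simp at hn
  | cons x xs ih =>
    cases n with
    | zero => simp [List.getD]; ring
    | succ m => simp [List.getD, ih m (by simpa using hn)]; ring

theorem length_le_sum (c : List Int) (h : ∀ v ∈ c, 1 ≤ v) : (c.length : Int) ≤ c.sum := by
  induction c with
  | nil => simp
  | cons x xs ih =>
    have hx := h x (List.mem_cons_self)
    have := ih (fun v hv => h v (List.mem_cons_of_mem _ hv))
    simp only [List.length_cons, List.sum_cons]
    push_cast
    omega

-- loop-1 invariant: first component is foldl Set.add; counts keep length = |q|, sum grows by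
-- one per character, every count stays ≥ 1.
theorem tmLoop1_inv (l : List Char) : ∀ (q : List Char) (c : List Int),
    c.length = q.length → (∀ v ∈ c, 1 ≤ v) →
    (tmLoop1 l (q, c)).1 = PySem.Set.update q l ∧
    (tmLoop1 l (q, c)).2.length = (PySem.Set.update q l).length ∧
    (tmLoop1 l (q, c)).2.sum = c.sum + l.length ∧
    (∀ v ∈ (tmLoop1 l (q, c)).2, 1 ≤ v) := by
  induction l with
  | nil =>
    intro q c hlen hpos
    exact ⟨rfl, by simp [tmLoop1, PySem.Set.update, hlen], by simp [tmLoop1], hpos⟩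
  | cons x rest ih =>
    intro q c hlen hpos
    have hupd : PySem.Set.update q (x :: rest) = PySem.Set.update (PySem.Set.add q x) rest := by
      simp [PySem.Set.update]
    by_cases hx : q.contains x
    · have hxm : x ∈ q := by simpa using hx
      obtain ⟨pos, hpe, hpos0, hposlt⟩ := EnQue_of_mem x q hxm
      have hadd : PySem.Set.add q x = q := by simp [PySem.Set.add, hxm]
      have hps : PySem.List.pySetD c pos (PySem.List.pyGetD c pos 0 + 1)
          = c.set pos.toNat (PySem.List.pyGetD c pos 0 + 1) :=
        PySem.List.pySetD_of_nonneg c _ hpos0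
      have hlt : pos.toNat < c.length := by omega
      have hget : PySem.List.pyGetD c pos 0 = c.getD pos.toNat 0 := by
        have hcast : pos = ((pos.toNat : Nat) : Int) := by omega
        conv_lhs => rw [hcast]
        rw [PySem.List.pyGetD_natCast]
      have hstep : tmLoop1 (x :: rest) (q, c)
          = tmLoop1 rest (q, PySem.List.pySetD c pos (PySem.List.pyGetD c pos 0 + 1)) := by
        simp [tmLoop1, aparece_eq_contains, hxm, hpe]
      rw [hstep]
      have hres := ih q (c.set pos.toNat (PySem.List.pyGetD c pos 0 + 1))
        (by simp [hlen]) ?_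
      · rw [hps]
        refine ⟨?_, ?_, ?_, hres.2.2.2⟩
        · rw [hres.1, hupd, hadd]
        · rw [hres.2.1, hupd, hadd]
        · rw [hres.2.2.1, sum_set_int c pos.toNat _ hlt, hget]
          simp only [List.length_cons]; push_cast; ring
      · intro v hv
        rcases List.mem_or_eq_of_mem_set hv with hv | rfl
        · exact hpos v hv
        · have hmem : c.getD pos.toNat 0 ∈ c := by
            rw [List.getD_eq_getElem c 0 hlt]; exact List.getElem_mem hlt
          have := hpos _ hmem
          rw [hget]; omega
    · have hxm : x ∉ q := by simpa using hx
      have hadd : PySem.Set.add q x = q ++ [x] := by simp [PySem.Set.add, hxm]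
      have hstep : tmLoop1 (x :: rest) (q, c) = tmLoop1 rest (q ++ [x], c ++ [1]) := by
        simp [tmLoop1, aparece_eq_contains, hxm]
      rw [hstep]
      have hres := ih (q ++ [x]) (c ++ [1]) (by simp [hlen])
        (by intro v hv; rcases List.mem_append.mp hv with hv | hv
            · exact hpos v hv
            · simp at hv; omega)
      refine ⟨?_, ?_, ?_, hres.2.2.2⟩
      · rw [hres.1, hupd, hadd]
      · rw [hres.2.1, hupd, hadd]
      · rw [hres.2.2.1]; simp only [List.sum_append, List.sum_cons, List.sum_nil,
          List.length_cons]; push_cast; ring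
    
theorem tmLoop2_spec (c : List Int) (h : ∀ v ∈ c, 1 ≤ v) : ∀ flag : Bool,
    tmLoop2 c flag = decide ((if flag then 1 else 2) ≤ c.sum - (c.length : Int)) := by
  induction c with
  | nil => intro flag; cases flag <;> simp [tmLoop2]
  | cons v rest ih =>
    intro flag
    have hv := h v List.mem_cons_self
    have hrest : ∀ w ∈ rest, 1 ≤ w := fun w hw => h w (List.mem_cons_of_mem _ hw)
    have hle := length_le_sum rest hrest
    have ihr := ih hrest
    by_cases h2 : v > 2
    · rw [tmLoop2, if_pos h2]
      symm
      rw [decide_eq_true_iff]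
      simp only [List.sum_cons, List.length_cons]
      cases flag <;> simp <;> omega
    · rw [tmLoop2, if_neg h2]
      by_cases he : v = 2
      · subst he
        cases flag with
        | true =>
          simp only [beq_self_eq_true, Bool.and_true, if_true]
          symm
          rw [decide_eq_true_iff]
          simp only [List.sum_cons, List.length_cons]
          push_cast
          omega
        | false =>
          simp only [beq_self_eq_true, Bool.and_false, Bool.not_false, Bool.and_true,
            if_true, Bool.false_eq_true, if_false, ihr true]
          rw [decide_eq_decide]
          simp only [List.sum_cons, List.length_cons]
          push_cast
          omega
      · have hv1 : v = 1 := by omega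
        subst hv1
        have hne : ((1 : Int) == 2) = false := by decide
        simp only [hne, Bool.false_and, Bool.false_eq_true, if_false, ihr flag]
        rw [decide_eq_decide]
        simp only [List.sum_cons, List.length_cons]
        push_cast
        omega

-- ===== VERDICT (by name: the statement is the Claim_ definition above) =====
theorem tieneMasDeUnRepetido_spec : Claim_equal_tieneMasDeUnRepetido := by
  intro cadena _
  unfold Spec_tieneMasDeUnRepetido tieneMasDeUnRepetido tieneMasDeUnRepetido_alt
  set l := cadena.toList with hl
  obtain ⟨h1, h2, h3, h4⟩ := tmLoop1_inv l [] [] rfl (by simp)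
  have hof : PySem.Set.update [] l = PySem.Set.ofList l := by
    simp [PySem.Set.update, PySem.Set.ofList_eq_foldl]
  rw [tmLoop2_spec _ h4 false, decide_eq_decide]
  rw [hof] at h2
  simp only [List.sum_nil, zero_add] at h3
  rw [h2, h3]
  simp only [Bool.false_eq_true, if_false]
  omega
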